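-- pv_equiv track=rewrite | github.com/Rikerz/demo | top_k_frequent_keywords.py | most_popular_keywords
-- ===== SOURCE A (Python) =====
-- def most_popular_keywords(reviews, keywords, k):
--     # If we are missing a parameter, there is nothing to return.
--     if not (reviews and keywords and k):
--         return []
--
--     # This is its own function because I don't know exactly what is expected.
--     # Therefore, I want to be able to change it easily.
--     def tokenize_review(review):
--         # Assume splitting on space is enough as a first guess.
--         return review.split(' ')
--
--     keyword_counts = {keyword: 0 for keyword in keywords}
--
--     # This is similar to what Elasticsearch would do when it "analyzes".
--     analyzed_reviews = [
--         set(tokenize_review(review.lower())) for review in reviews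
--     ]
--     for analyzed_review in analyzed_reviews:
--         for keyword in keywords:
--             if keyword in analyzed_review:
--                 keyword_counts[keyword] += 1
--
--     result = list(keyword_counts.items())
--
--     # Sort by descending count but ascending keyword.
--     result.sort(key=lambda x: (-x[1], x[0]))
--
--     # Take the top k and only return the keyword itself, not the count.
--     result = [item[0] for item in result[:k]]
--     return result
-- ===== SOURCE B (Python) =====
-- def most_popular_keywords(reviews, keywords, k):
--     if not (reviews and keywords and k):
--         return []
--
--     # Document-frequency table over ALL tokens of all reviews, built in one pass.
--     df = {}
--     for review in reviews:
--         for token in set(review.lower().split(' ')):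
--             df[token] = df.get(token, 0) + 1
--
--     # One dict lookup per keyword entry instead of scanning every review per keyword.
--     counts = {}
--     for kw in keywords:
--         counts[kw] = counts.get(kw, 0) + df.get(kw, 0)
--
--     items = sorted(counts.items(), key=lambda x: (-x[1], x[0]))
--     return [kw for kw, _ in items[:k]]
-- ===== Notes on version B (the rewrite author's own statement) =====
-- stated objective: faster
-- what changed: B builds one document-frequency dict over all tokens of all reviews in a single pass and then does one lookup per keyword entry, instead of A's nested scan testing every keyword against every review's token set; same (-count, keyword) sort and top-k slice.
import Mathlib
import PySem

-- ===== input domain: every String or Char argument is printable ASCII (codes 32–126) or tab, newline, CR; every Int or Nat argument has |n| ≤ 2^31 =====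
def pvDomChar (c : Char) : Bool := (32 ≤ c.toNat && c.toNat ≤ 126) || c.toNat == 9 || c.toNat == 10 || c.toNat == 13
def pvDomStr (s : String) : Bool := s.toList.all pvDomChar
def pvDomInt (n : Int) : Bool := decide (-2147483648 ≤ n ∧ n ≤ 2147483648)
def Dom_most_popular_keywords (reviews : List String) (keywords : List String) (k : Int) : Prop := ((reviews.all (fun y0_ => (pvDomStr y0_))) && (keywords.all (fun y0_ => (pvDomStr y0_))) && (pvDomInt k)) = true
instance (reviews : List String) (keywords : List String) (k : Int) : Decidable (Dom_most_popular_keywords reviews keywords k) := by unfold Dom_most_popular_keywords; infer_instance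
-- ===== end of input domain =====

-- B replaces A's scan testing every keyword against every review's token set by one
-- document-frequency dict built over all tokens, then one lookup per keyword entry;
-- same '(-count, keyword)' sort and top-k slice.

-- ===== PORT A =====
-- review.split(' '): sep is the nonempty literal " ", so split? is always `some`.
def pvTokenizeReview (review : String) : List String :=
  match PySem.Str.split? review " " with
  | some ts => ts
  | none => []

def most_popular_keywords (reviews : List String) (keywords : List String) (k : Int) : List String :=
  if reviews = [] ∨ keywords = [] ∨ k = 0 then []
  else
    let keyword_counts : PySem.Dict String Int :=
      keywords.foldl (fun d kw => d.insert kw 0) PySem.Dict.empty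
    let analyzed_reviews : List (PySem.Set String) :=
      reviews.map (fun review => PySem.Set.ofList (pvTokenizeReview (PySem.Str.lower review)))
    let kc := analyzed_reviews.foldl
      (fun d ar => keywords.foldl
        (fun d kw => if PySem.Set.contains ar kw then d.modify kw 0 (· + 1) else d) d)
      keyword_counts
    let result := PySem.List.sorted2 kc.items (fun x => -x.2) (fun x => x.1)
    (PySem.List.slice result none (some k)).map (fun item => item.1)

-- ===== PORT B =====
def most_popular_keywords_alt (reviews : List String) (keywords : List String) (k : Int) : List String :=
  if reviews = [] ∨ keywords = [] ∨ k = 0 then []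
  else
    let df : PySem.Dict String Int :=
      reviews.foldl (fun d review =>
        (PySem.Set.ofList (pvTokenizeReview (PySem.Str.lower review))).foldl
          (fun d token => d.insert token (d.getD token 0 + 1)) d)
        PySem.Dict.empty
    let counts : PySem.Dict String Int :=
      keywords.foldl (fun c kw => c.insert kw (c.getD kw 0 + df.getD kw 0)) PySem.Dict.empty
    let items := PySem.List.sorted2 counts.items (fun x => -x.2) (fun x => x.1)
    (PySem.List.slice items none (some k)).map (fun item => item.1)

-- ===== PRECONDITION & SPEC =====
def Spec_most_popular_keywords (reviews : List String) (keywords : List String) (k : Int) (out : List String) : Prop := out = most_popular_keywords_alt reviews keywords k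
instance (reviews : List String) (keywords : List String) (k : Int) (out : List String) : Decidable (Spec_most_popular_keywords reviews keywords k out) := by unfold Spec_most_popular_keywords; infer_instance

-- ===== CLAIM (what is proved, stated in full; the proofs are below) =====
def Claim_equal_most_popular_keywords : Prop := ∀ (reviews : List String) (keywords : List String) (k : Int), Dom_most_popular_keywords reviews keywords k → Spec_most_popular_keywords reviews keywords k (most_popular_keywords reviews keywords k)

-- ===== LEMMAS AND PROOFS =====

-- the per-review token set, shared shorthand for the proofs
def pvTok (review : String) : PySem.Set String :=
  PySem.Set.ofList (pvTokenizeReview (PySem.Str.lower review))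

-- A's initial dict {kw: 0 for kw in keywords}: every lookup with default 0 is 0
theorem pv_init_getD (kws : List String) (d : PySem.Dict String Int) (kw : String)
    (h : d.getD kw 0 = 0) :
    (kws.foldl (fun d kw' => d.insert kw' (0 : Int)) d).getD kw 0 = 0 := by
  induction kws generalizing d with
  | nil => exact h
  | cons x t ih =>
    simp only [List.foldl_cons]
    refine ih _ ?_
    rw [PySem.Dict.getD_insert]
    by_cases hkx : kw = x
    · rw [if_pos hkx]
    · rw [if_neg hkx]; exact h

-- A's inner keyword loop: values
theorem pv_inner_getD (kws : List String) (ar : PySem.Set String)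
    (d : PySem.Dict String Int) (kw : String) :
    (kws.foldl (fun d kw' => if PySem.Set.contains ar kw' then d.modify kw' 0 (· + 1) else d) d).getD kw 0
      = d.getD kw 0 + (if PySem.Set.contains ar kw then (kws.count kw : Int) else 0) := by
  induction kws generalizing d with
  | nil => simp
  | cons x t ih =>
    simp only [List.foldl_cons]
    by_cases hx : PySem.Set.contains ar x = true
    · rw [if_pos hx, ih, PySem.Dict.getD_modify]
      by_cases hkx : kw = x
      · subst hkx
        rw [if_pos rfl, if_pos hx, if_pos hx, List.count_cons_self]
        push_cast; ring
      · rw [if_neg hkx, List.count_cons_of_ne (Ne.symm hkx)]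
    · rw [if_neg hx, ih]
      by_cases hkx : kw = x
      · subst hkx
        rw [if_neg hx, if_neg hx]
      · rw [List.count_cons_of_ne (Ne.symm hkx)]

-- A's inner keyword loop: keys are unchanged (every modified key is already present)
theorem pv_inner_keys (kws : List String) (ar : PySem.Set String)
    (d : PySem.Dict String Int) (hsub : ∀ kw ∈ kws, d.contains kw = true) :
    (kws.foldl (fun d kw' => if PySem.Set.contains ar kw' then d.modify kw' 0 (· + 1) else d) d).keys
      = d.keys := by
  induction kws generalizing d with
  | nil => rfl
  | cons x t ih =>
    simp only [List.foldl_cons]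
    by_cases hx : PySem.Set.contains ar x = true
    · rw [if_pos hx]
      have hkeys : (d.modify x 0 (· + 1)).keys = d.keys := by
        rw [PySem.Dict.keys_modify]
        exact PySem.Dict.keys_insert_of_contains _ _ (hsub x (List.mem_cons_self))
      rw [ih _ ?_, hkeys]
      intro kw hkw
      rw [PySem.Dict.contains_iff_mem_keys, hkeys, ← PySem.Dict.contains_iff_mem_keys]
      exact hsub kw (List.mem_cons_of_mem _ hkw)
    · rw [if_neg hx]
      exact ih d (fun kw hkw => hsub kw (List.mem_cons_of_mem _ hkw))

-- A's outer loop over the analyzed reviews: values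
theorem pv_outer_getD (keywords : List String) (L : List (PySem.Set String))
    (d : PySem.Dict String Int) (kw : String) :
    (L.foldl (fun d ar => keywords.foldl
        (fun d kw' => if PySem.Set.contains ar kw' then d.modify kw' 0 (· + 1) else d) d) d).getD kw 0
      = d.getD kw 0 + (keywords.count kw : Int) * (L.countP (fun ar => PySem.Set.contains ar kw) : Int) := by
  induction L generalizing d with
  | nil => simp
  | cons ar t ih =>
    simp only [List.foldl_cons]
    rw [ih, pv_inner_getD, List.countP_cons]
    by_cases hc : PySem.Set.contains ar kw = true
    · rw [if_pos hc, hc, if_pos rfl]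
      push_cast; ring
    · rw [if_neg hc, eq_false_of_ne_true hc, if_neg (by simp)]
      push_cast; ring

-- A's outer loop: keys are unchanged
theorem pv_outer_keys (keywords : List String) (L : List (PySem.Set String))
    (d : PySem.Dict String Int) (hsub : ∀ kw ∈ keywords, d.contains kw = true) :
    (L.foldl (fun d ar => keywords.foldl
        (fun d kw' => if PySem.Set.contains ar kw' then d.modify kw' 0 (· + 1) else d) d) d).keys
      = d.keys := by
  induction L generalizing d with
  | nil => rfl
  | cons ar t ih =>
    simp only [List.foldl_cons]
    have hk := pv_inner_keys keywords ar d hsub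
    rw [ih _ ?_, hk]
    intro kw hkw
    rw [PySem.Dict.contains_iff_mem_keys, hk, ← PySem.Dict.contains_iff_mem_keys]
    exact hsub kw hkw

-- B's document-frequency dict: value at kw counts the reviews whose token set holds kw
theorem pv_df_getD (reviews : List String) (d : PySem.Dict String Int) (kw : String) :
    (reviews.foldl (fun d review =>
        (PySem.Set.ofList (pvTokenizeReview (PySem.Str.lower review))).foldl
          (fun d token => d.insert token (d.getD token 0 + 1)) d) d).getD kw 0
      = d.getD kw 0 + (reviews.countP (fun r => PySem.Set.contains (pvTok r) kw) : Int) := by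
  induction reviews generalizing d with
  | nil => simp
  | cons r t ih =>
    simp only [List.foldl_cons]
    rw [ih, PySem.Dict.getD_foldl_insert_add_one, List.countP_cons]
    by_cases hc : PySem.Set.contains (pvTok r) kw = true
    · have hmem : kw ∈ pvTok r := (PySem.Set.contains_iff _ _).mp hc
      rw [List.count_eq_one_of_mem (PySem.Set.nodup_ofList _) (by simpa [pvTok] using hmem),
          hc, if_pos rfl]
      push_cast; ring
    · have hmem : kw ∉ pvTok r := fun hm => hc ((PySem.Set.contains_iff _ _).mpr hm)
      rw [List.count_eq_zero_of_not_mem (by simpa [pvTok] using hmem),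
          eq_false_of_ne_true hc, if_neg (by simp)]
      push_cast; ring

-- B's keyword-accumulation loop: values
theorem pv_counts_getD (kws : List String) (f : String → Int)
    (c : PySem.Dict String Int) (kw : String) :
    (kws.foldl (fun c kw' => c.insert kw' (c.getD kw' 0 + f kw')) c).getD kw 0
      = c.getD kw 0 + (kws.count kw : Int) * f kw := by
  induction kws generalizing c with
  | nil => simp
  | cons x t ih =>
    simp only [List.foldl_cons]
    rw [ih, PySem.Dict.getD_insert]
    by_cases hkx : kw = x
    · subst hkx
      rw [if_pos rfl, List.count_cons_self]
      push_cast; ring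
    · rw [if_neg hkx, List.count_cons_of_ne (Ne.symm hkx)]

-- the item lists fed to the two sorts are equal
theorem pv_items_eq (reviews keywords : List String) :
    ((reviews.map (fun review => PySem.Set.ofList (pvTokenizeReview (PySem.Str.lower review)))).foldl
        (fun d ar => keywords.foldl
          (fun d kw => if PySem.Set.contains ar kw then d.modify kw 0 (· + 1) else d) d)
        (keywords.foldl (fun d kw => d.insert kw (0 : Int)) PySem.Dict.empty)).items
      = (keywords.foldl (fun c kw => c.insert kw (c.getD kw 0 +
          (reviews.foldl (fun d review =>
              (PySem.Set.ofList (pvTokenizeReview (PySem.Str.lower review))).foldl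
                (fun d token => d.insert token (d.getD token 0 + 1)) d) PySem.Dict.empty).getD kw 0))
          PySem.Dict.empty).items := by
  set L := reviews.map (fun review => PySem.Set.ofList (pvTokenizeReview (PySem.Str.lower review))) with hL
  set d0 := keywords.foldl (fun d kw => d.insert kw (0 : Int)) PySem.Dict.empty with hd0
  set df : PySem.Dict String Int := reviews.foldl (fun d review =>
      (PySem.Set.ofList (pvTokenizeReview (PySem.Str.lower review))).foldl
        (fun d token => d.insert token (d.getD token 0 + 1)) d) PySem.Dict.empty with hdf
  have hupd : ∀ l : List String, PySem.Set.update ([] : PySem.Set String) l = PySem.Set.ofList l := by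
    intro l; rw [PySem.Set.ofList_eq_foldl]; rfl
  have hd0keys : d0.keys = PySem.Set.ofList keywords := by
    rw [hd0, PySem.Dict.keys_foldl_insert keywords (fun _ _ => (0 : Int)) PySem.Dict.empty,
        PySem.Dict.keys_empty, hupd]
  have hsub : ∀ kw ∈ keywords, d0.contains kw = true := by
    intro kw hkw
    rw [PySem.Dict.contains_iff_mem_keys, hd0keys]
    exact (PySem.Set.mem_ofList keywords kw).mpr hkw
  have hkckeys : (L.foldl (fun d ar => keywords.foldl
      (fun d kw => if PySem.Set.contains ar kw then d.modify kw 0 (· + 1) else d) d) d0).keys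
      = PySem.Set.ofList keywords := by
    rw [pv_outer_keys keywords L d0 hsub, hd0keys]
  have hcountskeys : (keywords.foldl (fun c kw => c.insert kw (c.getD kw 0 + df.getD kw 0))
      PySem.Dict.empty).keys = PySem.Set.ofList keywords := by
    rw [PySem.Dict.keys_foldl_insert keywords (fun c kw => c.getD kw 0 + df.getD kw 0)
        PySem.Dict.empty, PySem.Dict.keys_empty, hupd]
  have hnodup1 : (L.foldl (fun d ar => keywords.foldl
      (fun d kw => if PySem.Set.contains ar kw then d.modify kw 0 (· + 1) else d) d) d0).keys.Nodup := by
    rw [hkckeys]; exact PySem.Set.nodup_ofList keywords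
  have hnodup2 : (keywords.foldl (fun c kw => c.insert kw (c.getD kw 0 + df.getD kw 0))
      PySem.Dict.empty).keys.Nodup := by
    rw [hcountskeys]; exact PySem.Set.nodup_ofList keywords
  rw [PySem.Dict.items_eq_map_keys _ hnodup1 (0 : Int),
      PySem.Dict.items_eq_map_keys _ hnodup2 (0 : Int), hkckeys, hcountskeys]
  apply List.map_congr_left
  intro kw hkw
  have hmem : kw ∈ keywords := (PySem.Set.mem_ofList keywords kw).mp hkw
  have hcp : L.countP (fun ar => PySem.Set.contains ar kw)
      = reviews.countP (fun r => PySem.Set.contains (pvTok r) kw) := by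
    rw [hL, List.countP_map]; rfl
  have hdfv : df.getD kw 0 = (reviews.countP (fun r => PySem.Set.contains (pvTok r) kw) : Int) := by
    rw [hdf, pv_df_getD, PySem.Dict.getD_empty]; ring
  rw [pv_outer_getD, pv_counts_getD, hcp, hdfv,
      pv_init_getD keywords PySem.Dict.empty kw (PySem.Dict.getD_empty kw 0),
      PySem.Dict.getD_empty]

-- ===== VERDICT (by name: the statement is the Claim_ definition above) =====
theorem most_popular_keywords_spec : Claim_equal_most_popular_keywords := by
  intro reviews keywords k _
  unfold Spec_most_popular_keywords most_popular_keywords most_popular_keywords_alt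
  by_cases hg : reviews = [] ∨ keywords = [] ∨ k = 0
  · rw [if_pos hg, if_pos hg]
  · rw [if_neg hg, if_neg hg]
    dsimp only
    rw [pv_items_eq reviews keywords]
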